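-- pv_equiv track=rewrite | github.com/genegeniebio/PathwayGenie | parts_genie/vienna.py | _get_bracket
-- ===== SOURCE A (Python) =====
-- def _get_bracket(strands, bp_x, bp_y):
--     '''get_bracket.'''
--     bp_x = [pos - 1 for pos in bp_x[:]]  # Shift so that 1st position is 0
--     bp_y = [pos - 1 for pos in bp_y[:]]  # Shift so that 1st position is 0
--
--     bracket_notation = []
--     counter = 0
--     for (strand_number, seq_len) in enumerate(strands):
--         if strand_number > 0:
--             bracket_notation.append('&')
--         for pos in range(counter, seq_len + counter):
--             if pos in bp_x:
--                 bracket_notation.append('(')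
--             elif pos in bp_y:
--                 bracket_notation.append(')')
--             else:
--                 bracket_notation.append('.')
--         counter += seq_len
--
--     return ''.join(bracket_notation)
-- ===== SOURCE B (Python) =====
-- def _get_bracket(strands, bp_x, bp_y):
--     '''get_bracket.'''
--     # Per-strand scatter-write: fill a local dot-array for each strand, then
--     # scatter ')' writes from bp_y and '(' writes from bp_x into it (bp_x last,
--     # so '(' wins shared positions, matching the if/elif precedence); pairs that
--     # fall outside the strand's range are skipped. Join segments with '&'.
--     segments = []
--     offset = 0
--     for seq_len in strands:
--         seg = ['.'] * seq_len
--         for pos in bp_y: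
--             i = pos - 1 - offset
--             if 0 <= i < seq_len:
--                 seg[i] = ')'
--         for pos in bp_x:
--             i = pos - 1 - offset
--             if 0 <= i < seq_len:
--                 seg[i] = '('
--         segments.append(''.join(seg))
--         offset += seq_len
--     return '&'.join(segments)
-- ===== Notes on version B (the rewrite author's own statement) =====
-- stated objective: faster
-- what changed: Inverts A's traversal: instead of scanning bp_x/bp_y for every sequence position, B fills each strand with dots at once and scatter-writes brackets into the array by iterating over the pair lists (bp_y then bp_x so '(' wins shared positions), then joins the per-strand segments with '&'.
import Mathlib
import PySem

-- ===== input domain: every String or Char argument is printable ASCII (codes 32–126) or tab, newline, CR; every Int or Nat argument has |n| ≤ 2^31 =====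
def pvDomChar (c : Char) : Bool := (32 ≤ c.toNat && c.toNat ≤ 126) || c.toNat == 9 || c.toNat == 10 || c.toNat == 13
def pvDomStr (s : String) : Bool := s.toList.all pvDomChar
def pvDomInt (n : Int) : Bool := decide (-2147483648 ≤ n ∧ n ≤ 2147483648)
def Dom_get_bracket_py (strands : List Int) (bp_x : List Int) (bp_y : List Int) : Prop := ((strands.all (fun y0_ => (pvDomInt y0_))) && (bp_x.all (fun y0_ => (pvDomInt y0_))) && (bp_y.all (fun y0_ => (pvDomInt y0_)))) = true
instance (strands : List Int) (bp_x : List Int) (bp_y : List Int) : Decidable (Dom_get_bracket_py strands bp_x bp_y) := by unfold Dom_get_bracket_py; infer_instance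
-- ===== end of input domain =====

-- B inverts A's traversal: per strand it fills a dot-array and scatter-writes brackets by
-- iterating over the pair lists (bp_x last so '(' wins shared positions), joining segments with '&'.
-- Objective: faster (removes the per-position membership scans over bp_x/bp_y).


-- ===== PORT A =====
-- bracket_notation (a list of 1-char strings in Python) is kept as a List Char; ''.join = String.ofList
def get_bracket_py (strands : List Int) (bp_x : List Int) (bp_y : List Int) : String :=
  let bpx := bp_x.map (fun pos => pos - 1)
  let bpy := bp_y.map (fun pos => pos - 1)
  let st := (PySem.List.enumerate strands 0).foldl
    (fun (acc : List Char × Int) sp =>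
      let bn1 := if sp.1 > 0 then acc.1 ++ ['&'] else acc.1
      let bn2 := (PySem.List.pyRange acc.2 (sp.2 + acc.2) 1).foldl
        (fun bn pos =>
          if bpx.contains pos then bn ++ ['(']
          else if bpy.contains pos then bn ++ [')']
          else bn ++ ['.']) bn1
      (bn2, acc.2 + sp.2)) ([], 0)
  String.ofList st.1

-- ===== PORT B =====
-- ['.'] * seq_len = List.replicate seq_len.toNat (Python list-multiply clamps negative to empty);
-- seg[i] = ch with the guarded in-range index is List.set (exact: Python never raises under the guard).
def get_bracket_py_alt (strands : List Int) (bp_x : List Int) (bp_y : List Int) : String :=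
  let st := strands.foldl
    (fun (acc : List String × Int) seq_len =>
      let seg0 : List Char := List.replicate seq_len.toNat '.'
      let seg1 := bp_y.foldl (fun seg pos =>
        let i := pos - 1 - acc.2
        if 0 ≤ i ∧ i < seq_len then seg.set i.toNat ')' else seg) seg0
      let seg2 := bp_x.foldl (fun seg pos =>
        let i := pos - 1 - acc.2
        if 0 ≤ i ∧ i < seq_len then seg.set i.toNat '(' else seg) seg1
      (acc.1 ++ [String.ofList seg2], acc.2 + seq_len))
    ([], 0)
  PySem.Str.join "&" st.1

-- ===== PRECONDITION & SPEC =====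
def Spec_get_bracket_py (strands : List Int) (bp_x : List Int) (bp_y : List Int) (out : String) : Prop := out = get_bracket_py_alt strands bp_x bp_y
instance (strands : List Int) (bp_x : List Int) (bp_y : List Int) (out : String) : Decidable (Spec_get_bracket_py strands bp_x bp_y out) := by unfold Spec_get_bracket_py; infer_instance

-- ===== CLAIM (what is proved, stated in full; the proofs are below) =====
def Claim_equal_get_bracket_py : Prop := ∀ (strands : List Int) (bp_x : List Int) (bp_y : List Int), Dom_get_bracket_py strands bp_x bp_y → Spec_get_bracket_py strands bp_x bp_y (get_bracket_py strands bp_x bp_y)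

-- ===== LEMMAS AND PROOFS =====

-- the character both programs place at absolute position p
def pvCharOf (bp_x bp_y : List Int) (p : Int) : Char :=
  if (bp_x.map (fun pos => pos - 1)).contains p then '('
  else if (bp_y.map (fun pos => pos - 1)).contains p then ')'
  else '.'

-- the per-strand character segments, from running offset c
def pvSegs (bp_x bp_y : List Int) : Int → List Int → List (List Char)
  | _, [] => []
  | c, s :: rest =>
    (PySem.List.pyRange c (s + c) 1).map (pvCharOf bp_x bp_y) :: pvSegs bp_x bp_y (c + s) rest

-- B's scatter fold preserves the segment length
theorem pvScatterLength (l : List Int) (ch : Char) (c s : Int) (seg : List Char) :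
    (l.foldl (fun seg pos =>
        let i := pos - 1 - c
        if 0 ≤ i ∧ i < s then seg.set i.toNat ch else seg) seg).length = seg.length := by
  induction l generalizing seg with
  | nil => rfl
  | cons a rest ih => simp only [List.foldl_cons]; rw [ih]; split_ifs <;> simp

-- element j of B's scatter fold: ch where some pair hits absolute position c+j, untouched elsewhere
theorem pvScatterGetElem (l : List Int) (ch : Char) (c s : Int) (seg : List Char)
    (hlen : seg.length = s.toNat) (j : Nat) :
    (l.foldl (fun seg pos =>
        let i := pos - 1 - c
        if 0 ≤ i ∧ i < s then seg.set i.toNat ch else seg) seg)[j]? =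
      if j < seg.length ∧ (c + (j : Int) + 1) ∈ l then some ch else seg[j]? := by
  induction l generalizing seg with
  | nil => simp
  | cons a rest ih =>
    simp only [List.foldl_cons]
    by_cases hc : 0 ≤ a - 1 - c ∧ a - 1 - c < s
    · rw [if_pos hc]
      rw [ih _ (by simp [hlen]), List.length_set]
      by_cases hj : j < seg.length
      · by_cases hr : (c + (j : Int) + 1) ∈ rest
        · rw [if_pos ⟨hj, hr⟩, if_pos ⟨hj, List.mem_cons_of_mem _ hr⟩]
        · rw [if_neg (fun h => hr h.2)]
          by_cases hhit : a = c + (j : Int) + 1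
          · have hij : (a - 1 - c).toNat = j := by omega
            rw [hij, List.getElem?_set_self hj,
              if_pos ⟨hj, by rw [hhit]; exact List.mem_cons_self⟩]
          · rw [List.getElem?_set_ne (by omega),
              if_neg (by rintro ⟨_, hmem⟩
                         rcases List.mem_cons.mp hmem with h | h
                         · exact hhit h.symm
                         · exact hr h)]
      · rw [if_neg (fun h => hj h.1), if_neg (fun h => hj h.1),
          List.getElem?_set_ne (by omega)]
    · rw [if_neg hc]
      rw [ih _ hlen]
      by_cases hj : j < seg.length
      · by_cases hr : (c + (j : Int) + 1) ∈ rest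
        · rw [if_pos ⟨hj, hr⟩, if_pos ⟨hj, List.mem_cons_of_mem _ hr⟩]
        · rw [if_neg (fun h => hr h.2),
            if_neg (by rintro ⟨_, hmem⟩
                       rcases List.mem_cons.mp hmem with h | h
                       · exact hc ⟨by omega, by omega⟩
                       · exact hr h)]
      · rw [if_neg (fun h => hj h.1), if_neg (fun h => hj h.1)]

-- membership in the shifted pair list, as the absolute position's successor
theorem pvContainsShift (l : List Int) (p : Int) :
    ((l.map (fun pos => pos - 1)).contains p = true) ↔ (p + 1) ∈ l := by
  simp only [List.contains_eq_mem, List.mem_map, decide_eq_true_eq]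
  constructor
  · rintro ⟨a, ha, rfl⟩; simpa using ha
  · intro h; exact ⟨p + 1, h, by ring⟩

-- B's two scatter folds over the dot-filled segment compute exactly A's per-position characters
theorem pvSegEq (bp_x bp_y : List Int) (c s : Int) :
    (bp_x.foldl (fun seg pos =>
        let i := pos - 1 - c
        if 0 ≤ i ∧ i < s then seg.set i.toNat '(' else seg)
      (bp_y.foldl (fun seg pos =>
        let i := pos - 1 - c
        if 0 ≤ i ∧ i < s then seg.set i.toNat ')' else seg)
        (List.replicate s.toNat '.')))
      = (PySem.List.pyRange c (s + c) 1).map (pvCharOf bp_x bp_y) := by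
  have hlen1 : (bp_y.foldl (fun seg pos =>
      let i := pos - 1 - c
      if 0 ≤ i ∧ i < s then seg.set i.toNat ')' else seg)
      (List.replicate s.toNat '.')).length = s.toNat := by
    rw [pvScatterLength]; simp
  apply List.ext_getElem?
  intro j
  rw [pvScatterGetElem _ _ _ _ _ hlen1 j, pvScatterGetElem _ _ _ _ _ (by simp) j, hlen1]
  simp only [List.length_replicate]
  by_cases hj : j < s.toNat
  · have hrange : ((PySem.List.pyRange c (s + c) 1).map (pvCharOf bp_x bp_y))[j]? =
        some (pvCharOf bp_x bp_y (c + (j : Int))) := by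
      rw [List.getElem?_map, PySem.List.getElem?_pyRange_one]
      simp only [show (s + c - c) = s from by ring]
      simp [hj]
    rw [hrange]
    unfold pvCharOf
    simp only [pvContainsShift]
    by_cases hx : (c + (j : Int) + 1) ∈ bp_x
    · simp [hx, hj]
    · by_cases hy : (c + (j : Int) + 1) ∈ bp_y
      · simp [hx, hy, hj]
      · simp [hx, hy, hj]
  · have h1 : ((PySem.List.pyRange c (s + c) 1).map (pvCharOf bp_x bp_y))[j]? = none := by
      rw [List.getElem?_eq_none]
      rw [List.length_map, PySem.List.length_pyRange_one]
      simp only [show (s + c - c) = s from by ring]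
      omega
    rw [h1, if_neg (fun h => hj h.1), if_neg (fun h => hj h.1),
      List.getElem?_eq_none (by simpa using hj)]

theorem pvInnerFold (bp_x bp_y : List Int) (l : List Int) (bn : List Char) :
    (l.foldl (fun bn pos =>
        if (bp_x.map (fun pos => pos - 1)).contains pos then bn ++ ['(']
        else if (bp_y.map (fun pos => pos - 1)).contains pos then bn ++ [')']
        else bn ++ ['.']) bn) = bn ++ l.map (pvCharOf bp_x bp_y) := by
  have h : (fun (bn : List Char) pos =>
      if (bp_x.map (fun pos => pos - 1)).contains pos then bn ++ ['(']
      else if (bp_y.map (fun pos => pos - 1)).contains pos then bn ++ [')']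
      else bn ++ ['.']) = fun bn pos => bn ++ [pvCharOf bp_x bp_y pos] := by
    funext bn pos; unfold pvCharOf; split_ifs <;> rfl
  rw [h, PySem.List.foldl_append_singleton_eq_map]

-- A's outer loop over the enumerated tail (indices ≥ 1): every segment is prefixed with '&'
theorem pvAFoldTail (bp_x bp_y : List Int) (strands : List Int) (n : Int) (hn : 1 ≤ n)
    (bn : List Char) (c : Int) :
    ((PySem.List.enumerate strands n).foldl
      (fun (acc : List Char × Int) sp =>
        ((PySem.List.pyRange acc.2 (sp.2 + acc.2) 1).foldl
          (fun bn pos =>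
            if (bp_x.map (fun pos => pos - 1)).contains pos then bn ++ ['(']
            else if (bp_y.map (fun pos => pos - 1)).contains pos then bn ++ [')']
            else bn ++ ['.']) (if sp.1 > 0 then acc.1 ++ ['&'] else acc.1),
         acc.2 + sp.2)) (bn, c)).1
      = bn ++ ((pvSegs bp_x bp_y c strands).map (fun sg => '&' :: sg)).flatten := by
  induction strands generalizing n bn c with
  | nil => simp [PySem.List.enumerate, pvSegs]
  | cons st rest ih =>
    rw [PySem.List.enumerate_cons]
    simp only [List.foldl_cons]
    have hpos : (n > 0) = True := by simp; omega
    simp only [hpos, if_true]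
    rw [pvInnerFold]
    rw [ih (n+1) (by omega)]
    simp [pvSegs, List.append_assoc]

-- B's outer loop produces exactly the segments (as strings)
theorem pvBFold (bp_x bp_y : List Int) (strands : List Int) (c : Int) (acc : List String) :
    (strands.foldl
      (fun (acc : List String × Int) seq_len =>
        let seg0 : List Char := List.replicate seq_len.toNat '.'
        let seg1 := bp_y.foldl (fun seg pos =>
          let i := pos - 1 - acc.2
          if 0 ≤ i ∧ i < seq_len then seg.set i.toNat ')' else seg) seg0
        let seg2 := bp_x.foldl (fun seg pos =>
          let i := pos - 1 - acc.2
          if 0 ≤ i ∧ i < seq_len then seg.set i.toNat '(' else seg) seg1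
        (acc.1 ++ [String.ofList seg2], acc.2 + seq_len)) (acc, c)).1
      = acc ++ (pvSegs bp_x bp_y c strands).map String.ofList := by
  induction strands generalizing c acc with
  | nil => simp [pvSegs]
  | cons s rest ih =>
    simp only [List.foldl_cons]
    rw [ih]
    rw [pvSegEq bp_x bp_y c s]
    simp [pvSegs, List.append_assoc]

-- joining the segment strings with "&" is the flattened '&'-prefixed char list
theorem pvJoinSegs (sg0 : List Char) (rest : List (List Char)) :
    PySem.Str.join "&" ((sg0 :: rest).map String.ofList)
      = String.ofList (sg0 ++ (rest.map (fun sg => '&' :: sg)).flatten) := by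
  induction rest generalizing sg0 with
  | nil =>
    apply String.toList_injective
    simp [PySem.Str.toList_join, PySem.Chars.join_singleton]
  | cons b r ih =>
    apply String.toList_injective
    have h1 := congrArg String.toList (ih b)
    simp only [PySem.Str.toList_join, String.toList_ofList, List.map_cons, List.map_map] at h1 ⊢
    rw [PySem.Chars.join_cons_cons, h1]
    simp [List.append_assoc]

-- ===== VERDICT =====
theorem get_bracket_py_spec : Claim_equal_get_bracket_py := by
  intro strands bp_x bp_y _
  unfold Spec_get_bracket_py
  simp only [get_bracket_py, get_bracket_py_alt]
  rw [pvBFold]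
  cases strands with
  | nil =>
    apply String.toList_injective
    simp [PySem.List.enumerate_nil, pvSegs, PySem.Str.toList_join, PySem.Chars.join_nil]
  | cons s rest =>
    rw [PySem.List.enumerate_cons, List.foldl_cons]
    simp only [show ¬((0:Int) > 0) from by omega, if_false]
    rw [pvInnerFold, pvAFoldTail bp_x bp_y rest (0+1) (by omega)]
    rw [show pvSegs bp_x bp_y 0 (s :: rest)
        = (PySem.List.pyRange 0 (s + 0) 1).map (pvCharOf bp_x bp_y) :: pvSegs bp_x bp_y (0 + s) rest from rfl]
    simp only [List.nil_append]
    rw [pvJoinSegs]
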